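-- pv_equiv track=rewrite | github.com/MrBrantCode/unitest_baseline | mut_generate/mist_train_taco/taco_10032/solution.py | find_minimal_voucher_cost
-- ===== SOURCE A (Python) =====
-- def find_minimal_voucher_cost(n, x, vouchers):
--     from collections import defaultdict
--     import sys
--
--     # Initialize a dictionary to store vouchers by their duration
--     duration_dict = defaultdict(list)
--
--     # Populate the dictionary with vouchers grouped by their duration
--     for l, r, cost in vouchers:
--         duration = r - l + 1
--         if duration <= x:
--             duration_dict[duration].append((l, r, cost))
--
--     # Sort each list of vouchers by their start day
--     for duration in duration_dict:
--         duration_dict[duration].sort()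
--
--     # Initialize the answer to a large number
--     ans = sys.maxsize
--
--     # Iterate over each possible duration
--     for duration in range(1, x):
--         if duration in duration_dict and (x - duration) in duration_dict:
--             min_cost_other_duration = sys.maxsize
--             j = 0
--             for l1, r1, cost1 in duration_dict[duration]:
--                 # Find the minimum cost of the other duration that doesn't intersect
--                 while j < len(duration_dict[x - duration]) and duration_dict[x - duration][j][1] < l1:
--                     _, _, cost2 = duration_dict[x - duration][j]
--                     min_cost_other_duration = min(min_cost_other_duration, cost2)
--                     j += 1
--                 # Update the answer with the sum of the current voucher cost and the minimum cost found
--                 ans = min(ans, cost1 + min_cost_other_duration)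
--
--     # If no valid pair was found, return -1
--     return ans if ans != sys.maxsize else -1
-- ===== SOURCE B (Python) =====
-- def find_minimal_voucher_cost(n, x, vouchers):
--     # Straight minimum over all valid ordered pairs (first voucher ends before
--     # the second starts, durations positive and summing to x).
--     best = None
--     for l1, r1, c1 in vouchers:
--         d1 = r1 - l1 + 1
--         for l2, r2, c2 in vouchers:
--             if r1 < l2 and 1 <= d1 and 1 <= r2 - l2 + 1 and d1 + (r2 - l2 + 1) == x:
--                 s = c1 + c2
--                 if best is None or s < best:
--                     best = s
--     return best if best is not None else -1
-- ===== Notes on version B (the rewrite author's own statement) =====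
-- stated objective: simpler
-- what changed: Replaced the duration-bucketing dict + per-group sort + shared two-pointer prefix-minimum sweep by a direct minimum over all valid ordered voucher pairs (first ends before second starts, positive durations summing to x), which also fixes A's sentinel leak.
-- intended difference: On inputs with no valid non-overlapping pair of durations summing to x but containing a negative-cost voucher of duration d in [1,x-1] alongside some voucher of duration x-d, A leaks its sys.maxsize sentinel and returns min_cost+sys.maxsize (a huge garbage value) while B returns the intended -1 (no valid pair). — e.g. on find_minimal_voucher_cost(2, 2, [(1, 1, -5), (1, 1, 3)]): A returns 9223372036854775802, B returns -1
import Mathlib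
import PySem

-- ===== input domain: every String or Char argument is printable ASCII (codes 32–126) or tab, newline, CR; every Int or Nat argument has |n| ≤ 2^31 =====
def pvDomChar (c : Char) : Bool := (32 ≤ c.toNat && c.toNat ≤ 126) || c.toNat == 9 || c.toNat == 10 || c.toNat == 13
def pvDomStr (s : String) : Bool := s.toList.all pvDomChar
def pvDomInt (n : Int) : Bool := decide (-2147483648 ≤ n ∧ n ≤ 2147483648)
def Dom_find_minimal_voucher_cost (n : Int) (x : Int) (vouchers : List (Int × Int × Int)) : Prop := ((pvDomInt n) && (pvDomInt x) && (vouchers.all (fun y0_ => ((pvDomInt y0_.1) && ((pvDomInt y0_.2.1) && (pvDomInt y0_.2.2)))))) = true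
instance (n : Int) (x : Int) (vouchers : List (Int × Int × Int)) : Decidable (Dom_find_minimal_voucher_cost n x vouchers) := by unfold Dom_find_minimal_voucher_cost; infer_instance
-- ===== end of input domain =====

-- B replaces A's duration-bucketing dict + per-group sort + two-pointer prefix-minimum sweep by a
-- direct minimum over all valid ordered voucher pairs (simpler, not faster); outside D_ they agree.

-- ===== PORT A =====

def pvMaxsize : Int := 9223372036854775807   -- sys.maxsize

def pvDur (v : Int × Int × Int) : Int := v.2.1 - v.1 + 1

-- 'for l, r, cost in vouchers: if duration <= x: duration_dict[duration].append((l, r, cost))'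
def pvBuild (x : Int) (vouchers : List (Int × Int × Int)) : PySem.Dict Int (List (Int × Int × Int)) :=
  vouchers.foldl
    (fun d v => if pvDur v ≤ x then d.modify (pvDur v) [] (fun g => g ++ [v]) else d)
    PySem.Dict.empty

-- 'for duration in duration_dict: duration_dict[duration].sort()'.
-- Python sorts the triples lexicographically; inside a duration group r = l + duration - 1 is
-- determined by l, so on these groups the order on (l, r, cost) IS the order on (l, cost):
-- ported as the stable sort with tuple key (l, cost), exact on every list this dict stores.
def pvSortGroups (dd : PySem.Dict Int (List (Int × Int × Int))) : PySem.Dict Int (List (Int × Int × Int)) :=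
  dd.keys.foldl
    (fun d k => d.insert k (PySem.List.sorted2 (d.getD k []) (fun v => v.1) (fun v => v.2.2) false))
    dd

-- the inner 'while j < len(...) and ...[j][1] < l1' loop; the index j is ported as the
-- remaining suffix of duration_dict[x - duration] (j ↔ how much has been consumed)
def pvAdvance (l1 : Int) : List (Int × Int × Int) → Int → List (Int × Int × Int) × Int
  | [], mo => ([], mo)
  | v :: t, mo => if v.2.1 < l1 then pvAdvance l1 t (min mo v.2.2) else (v :: t, mo)

-- 'min_cost_other_duration = sys.maxsize; j = 0; for l1, r1, cost1 in duration_dict[duration]: …'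
def pvInner (g1 g2 : List (Int × Int × Int)) (ans : Int) : Int :=
  (g1.foldl
    (fun s v1 =>
      let p := pvAdvance v1.1 s.1 s.2.1
      (p.1, p.2, min s.2.2 (v1.2.2 + p.2)))
    (g2, pvMaxsize, ans)).2.2

def find_minimal_voucher_cost (n : Int) (x : Int) (vouchers : List (Int × Int × Int)) : Int :=
  let dd := pvSortGroups (pvBuild x vouchers)
  let ans := (PySem.List.pyRange 1 x 1).foldl
    (fun ans d =>
      if dd.contains d && dd.contains (x - d) then
        pvInner (dd.getD d []) (dd.getD (x - d) []) ans
      else ans)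
    pvMaxsize
  if ans ≠ pvMaxsize then ans else -1

-- ===== PORT B =====

-- 'if best is None or s < best: best = s'
def pvAltUpd (b : Option Int) (s : Int) : Option Int :=
  match b with
  | none => some s
  | some m => if s < m then some s else some m

def find_minimal_voucher_cost_alt (n : Int) (x : Int) (vouchers : List (Int × Int × Int)) : Int :=
  let best := vouchers.foldl
    (fun b u =>
      let (l1, r1, c1) := u
      let d1 := r1 - l1 + 1
      vouchers.foldl
        (fun b v =>
          let (l2, r2, c2) := v
          if r1 < l2 ∧ 1 ≤ d1 ∧ 1 ≤ r2 - l2 + 1 ∧ d1 + (r2 - l2 + 1) = x then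
            pvAltUpd b (c1 + c2)
          else b)
        b)
    (none : Option Int)
  match best with
  | some m => m
  | none => -1

-- ===== PRECONDITION & SPEC =====

-- On inputs with no valid non-overlapping pair of durations summing to x but containing a
-- negative-cost voucher of duration d ∈ [1, x-1] alongside some voucher of duration x-d,
-- A leaks its sys.maxsize sentinel and returns min_cost + sys.maxsize (a huge garbage value),
-- while B returns the intended -1 ("no valid pair").
def D_find_minimal_voucher_cost (n : Int) (x : Int) (vouchers : List (Int × Int × Int)) : Prop :=
  (∀ u ∈ vouchers, ∀ v ∈ vouchers,
      ¬(u.2.1 < v.1 ∧ 1 ≤ pvDur u ∧ 1 ≤ pvDur v ∧ pvDur u + pvDur v = x)) ∧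
  (∃ w ∈ vouchers, w.2.2 < 0 ∧ 1 ≤ pvDur w ∧ pvDur w < x ∧
      ∃ z ∈ vouchers, pvDur z = x - pvDur w)

instance (n : Int) (x : Int) (vouchers : List (Int × Int × Int)) : Decidable (D_find_minimal_voucher_cost n x vouchers) := by
  unfold D_find_minimal_voucher_cost; infer_instance

def Spec_find_minimal_voucher_cost (n : Int) (x : Int) (vouchers : List (Int × Int × Int)) (out : Int) : Prop :=
  ¬ D_find_minimal_voucher_cost n x vouchers → out = find_minimal_voucher_cost_alt n x vouchers
instance (n : Int) (x : Int) (vouchers : List (Int × Int × Int)) (out : Int) : Decidable (Spec_find_minimal_voucher_cost n x vouchers out) := by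
  unfold Spec_find_minimal_voucher_cost; infer_instance

def pvDiffWitness_find_minimal_voucher_cost : Int × Int × (List (Int × Int × Int)) :=
  (2, 2, [(1, 1, -5), (1, 1, 3)])

def pvDiffWitnessOut_find_minimal_voucher_cost : Int × Int := (9223372036854775802, -1)

-- ===== CLAIM (what is proved, stated in full; the proofs are below) =====
def Claim_unchanged_find_minimal_voucher_cost : Prop := ∀ (n : Int) (x : Int) (vouchers : List (Int × Int × Int)), Dom_find_minimal_voucher_cost n x vouchers → Spec_find_minimal_voucher_cost n x vouchers (find_minimal_voucher_cost n x vouchers)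
def Claim_changed_find_minimal_voucher_cost : Prop := Dom_find_minimal_voucher_cost (pvDiffWitness_find_minimal_voucher_cost.1) (pvDiffWitness_find_minimal_voucher_cost.2.1) (pvDiffWitness_find_minimal_voucher_cost.2.2) ∧ D_find_minimal_voucher_cost (pvDiffWitness_find_minimal_voucher_cost.1) (pvDiffWitness_find_minimal_voucher_cost.2.1) (pvDiffWitness_find_minimal_voucher_cost.2.2) ∧ find_minimal_voucher_cost (pvDiffWitness_find_minimal_voucher_cost.1) (pvDiffWitness_find_minimal_voucher_cost.2.1) (pvDiffWitness_find_minimal_voucher_cost.2.2) = pvDiffWitnessOut_find_minimal_voucher_cost.1 ∧ find_minimal_voucher_cost_alt (pvDiffWitness_find_minimal_voucher_cost.1) (pvDiffWitness_find_minimal_voucher_cost.2.1) (pvDiffWitness_find_minimal_voucher_cost.2.2) = pvDiffWitnessOut_find_minimal_voucher_cost.2 ∧ pvDiffWitnessOut_find_minimal_voucher_cost.1 ≠ pvDiffWitnessOut_find_minimal_voucher_cost.2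
def Claim_exact_find_minimal_voucher_cost : Prop := ∀ (n : Int) (x : Int) (vouchers : List (Int × Int × Int)), Dom_find_minimal_voucher_cost n x vouchers → D_find_minimal_voucher_cost n x vouchers → find_minimal_voucher_cost n x vouchers ≠ find_minimal_voucher_cost_alt n x vouchers


-- ===== LEMMAS AND PROOFS =====

-- ---- generic fold lemmas ----

theorem pv_foldl_foldl {α β γ : Type} (g : β → α → β) (K : γ → List α) :
    ∀ (L : List γ) (init : β),
      L.foldl (fun a d => (K d).foldl g a) init = (L.flatMap K).foldl g init := by
  intro L
  induction L with
  | nil => intro init; simp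
  | cons d t ih => intro init; simp [List.flatMap_cons, List.foldl_append, ih]

theorem pv_foldl_upd_some : ∀ (L : List Int) (m : Int),
    L.foldl pvAltUpd (some m) = some (L.foldl min m) := by
  intro L
  induction L with
  | nil => intro m; rfl
  | cons s t ih =>
    intro m
    have h : pvAltUpd (some m) s = some (min m s) := by
      simp only [pvAltUpd]
      split_ifs with h <;> simp [min_def] <;> omega
    simp only [List.foldl_cons, h, ih]

theorem pv_foldl_upd_none (L : List Int) :
    L.foldl pvAltUpd none = (match L with | [] => none | s :: t => some (t.foldl min s)) := by
  cases L with
  | nil => rfl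
  | cons s t => simp only [List.foldl_cons, pvAltUpd, pv_foldl_upd_some]

-- ---- B characterised as the minimum of the candidate-sum list ----

def pvGoodB (x : Int) (u v : Int × Int × Int) : Bool :=
  decide (u.2.1 < v.1 ∧ 1 ≤ u.2.1 - u.1 + 1 ∧ 1 ≤ v.2.1 - v.1 + 1 ∧
      (u.2.1 - u.1 + 1) + (v.2.1 - v.1 + 1) = x)

def pvCands (x : Int) (vs : List (Int × Int × Int)) : List Int :=
  vs.flatMap (fun u => ((vs.filter (pvGoodB x u)).map (fun v => u.2.2 + v.2.2)))

theorem alt_eq_cands (n x : Int) (vs : List (Int × Int × Int)) :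
    find_minimal_voucher_cost_alt n x vs =
      (match pvCands x vs with | [] => -1 | s :: t => t.foldl min s) := by
  unfold find_minimal_voucher_cost_alt
  have hfun : (fun (b : Option Int) (u : Int × Int × Int) =>
      let (l1, r1, c1) := u
      let d1 := r1 - l1 + 1
      vs.foldl
        (fun b v =>
          let (l2, r2, c2) := v
          if r1 < l2 ∧ 1 ≤ d1 ∧ 1 ≤ r2 - l2 + 1 ∧ d1 + (r2 - l2 + 1) = x then
            pvAltUpd b (c1 + c2)
          else b)
        b)
    = (fun (b : Option Int) (u : Int × Int × Int) =>
      vs.foldl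
        (fun b v =>
          if u.2.1 < v.1 ∧ 1 ≤ u.2.1 - u.1 + 1 ∧ 1 ≤ v.2.1 - v.1 + 1 ∧
              (u.2.1 - u.1 + 1) + (v.2.1 - v.1 + 1) = x then
            pvAltUpd b (u.2.2 + v.2.2)
          else b)
        b) := by
    funext b u
    obtain ⟨l1, r1, c1⟩ := u
    refine congrArg (fun f => vs.foldl f b) ?_
    funext b v
    obtain ⟨l2, r2, c2⟩ := v
    rfl
  rw [hfun]
  have h1 : ∀ (u : Int × Int × Int) (b : Option Int),
      vs.foldl (fun b v => if u.2.1 < v.1 ∧ 1 ≤ u.2.1 - u.1 + 1 ∧ 1 ≤ v.2.1 - v.1 + 1 ∧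
          (u.2.1 - u.1 + 1) + (v.2.1 - v.1 + 1) = x then pvAltUpd b (u.2.2 + v.2.2) else b) b
        = ((vs.filter (pvGoodB x u)).map (fun v => u.2.2 + v.2.2)).foldl pvAltUpd b := by
    intro u b
    rw [PySem.List.foldl_ite_eq_foldl_filter, List.foldl_map]
    rfl
  simp only [h1]
  rw [pv_foldl_foldl pvAltUpd (fun u => ((vs.filter (pvGoodB x u)).map (fun v => u.2.2 + v.2.2)))]
  rw [pv_foldl_upd_none]
  unfold pvCands
  cases (List.flatMap (fun u => ((vs.filter (pvGoodB x u)).map (fun v => u.2.2 + v.2.2))) vs) <;> rfl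

theorem mem_cands (x : Int) (vs : List (Int × Int × Int)) (s : Int) :
    s ∈ pvCands x vs ↔ ∃ u ∈ vs, ∃ v ∈ vs, pvGoodB x u v = true ∧ s = u.2.2 + v.2.2 := by
  simp only [pvCands, List.mem_flatMap, List.mem_map, List.mem_filter]
  constructor
  · rintro ⟨u, hu, v, ⟨hv, hg⟩, rfl⟩; exact ⟨u, hu, v, hv, hg, rfl⟩
  · rintro ⟨u, hu, v, hv, hg, rfl⟩; exact ⟨u, hu, v, ⟨hv, hg⟩, rfl⟩

theorem cands_nil_iff (x : Int) (vs : List (Int × Int × Int)) :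
    pvCands x vs = [] ↔ ∀ u ∈ vs, ∀ v ∈ vs, pvGoodB x u v = false := by
  constructor
  · intro h u hu v hv
    by_contra hb
    have : (u.2.2 + v.2.2) ∈ pvCands x vs :=
      (mem_cands x vs _).mpr ⟨u, hu, v, hv, by revert hb; cases pvGoodB x u v <;> simp, rfl⟩
    rw [h] at this; exact absurd this (List.not_mem_nil)
  · intro h
    rcases hc : pvCands x vs with _ | ⟨s, t⟩
    · rfl
    · exfalso
      have : s ∈ pvCands x vs := by rw [hc]; exact List.mem_cons_self
      rcases (mem_cands x vs s).mp this with ⟨u, hu, v, hv, hg, _⟩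
      rw [h u hu v hv] at hg; exact Bool.false_ne_true hg


-- ---- the duration dictionary of A, characterised ----

def pvGrpB (x k : Int) (v : Int × Int × Int) : Bool :=
  decide (pvDur v ≤ x) && (pvDur v == k)

theorem build_loop_getD (x : Int) : ∀ (l : List (Int × Int × Int))
    (d : PySem.Dict Int (List (Int × Int × Int))) (k : Int),
    (l.foldl (fun d v => if pvDur v ≤ x then d.modify (pvDur v) [] (fun g => g ++ [v]) else d) d).getD k []
      = d.getD k [] ++ l.filter (pvGrpB x k) := by
  intro l
  induction l with
  | nil => intro d k; simp
  | cons v t ih =>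
    intro d k
    simp only [List.foldl_cons]
    by_cases hx : pvDur v ≤ x
    · rw [if_pos hx, ih]
      by_cases hk : pvDur v = k
      · have : (d.modify (pvDur v) [] (fun g => g ++ [v])).getD k [] = d.getD k [] ++ [v] := by
          rw [PySem.Dict.getD_modify, if_pos hk.symm, hk]
        rw [this]
        have hg : pvGrpB x k v = true := by simp [pvGrpB, hk]; omega
        simp [hg, List.append_assoc]
      · have : (d.modify (pvDur v) [] (fun g => g ++ [v])).getD k [] = d.getD k [] := by
          rw [PySem.Dict.getD_modify, if_neg (fun h => hk h.symm)]
        rw [this]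
        have hg : pvGrpB x k v = false := by simp [pvGrpB, hk]
        simp [hg]
    · rw [if_neg hx, ih]
      have hg : pvGrpB x k v = false := by simp [pvGrpB, hx]
      simp [hg]

theorem build_getD (x : Int) (vs : List (Int × Int × Int)) (k : Int) :
    (pvBuild x vs).getD k [] = vs.filter (pvGrpB x k) := by
  unfold pvBuild
  rw [build_loop_getD]
  simp

theorem build_loop_contains (x : Int) : ∀ (l : List (Int × Int × Int))
    (d : PySem.Dict Int (List (Int × Int × Int))) (k : Int),
    (l.foldl (fun d v => if pvDur v ≤ x then d.modify (pvDur v) [] (fun g => g ++ [v]) else d) d).contains k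
      = (d.contains k || l.any (pvGrpB x k)) := by
  intro l
  induction l with
  | nil => intro d k; simp
  | cons v t ih =>
    intro d k
    simp only [List.foldl_cons]
    by_cases hx : pvDur v ≤ x
    · rw [if_pos hx, ih, PySem.Dict.contains_modify]
      by_cases hk : pvDur v = k
      · have hg : pvGrpB x k v = true := by simp [pvGrpB, hk]; omega
        simp [hg, hk]
      · have hg : pvGrpB x k v = false := by simp [pvGrpB, hk]
        have hne : (k == pvDur v) = false := by
          simp only [beq_eq_false_iff_ne, ne_eq]
          exact fun h => hk h.symm
        simp [hg, hne]
    · rw [if_neg hx, ih]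
      have hg : pvGrpB x k v = false := by simp [pvGrpB, hx]
      simp [hg]

theorem build_contains (x : Int) (vs : List (Int × Int × Int)) (k : Int) :
    (pvBuild x vs).contains k = vs.any (pvGrpB x k) := by
  unfold pvBuild
  rw [build_loop_contains]
  simp

theorem build_loop_nodup (x : Int) : ∀ (l : List (Int × Int × Int))
    (d : PySem.Dict Int (List (Int × Int × Int))), d.keys.Nodup →
    (l.foldl (fun d v => if pvDur v ≤ x then d.modify (pvDur v) [] (fun g => g ++ [v]) else d) d).keys.Nodup := by
  intro l
  induction l with
  | nil => intro d h; exact h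
  | cons v t ih =>
    intro d h
    simp only [List.foldl_cons]
    by_cases hx : pvDur v ≤ x
    · rw [if_pos hx]
      refine ih _ ?_
      have hk := PySem.Dict.keys_modify d (pvDur v) [] (fun g => g ++ [v])
      rw [List.Nodup, hk]
      exact PySem.Dict.nodup_keys_insert _ _ _ h
    · rw [if_neg hx]; exact ih _ h

theorem build_nodup_keys (x : Int) (vs : List (Int × Int × Int)) :
    (pvBuild x vs).keys.Nodup :=
  build_loop_nodup x vs PySem.Dict.empty PySem.Dict.nodup_keys_empty

-- ---- the sort-each-group loop, characterised ----

theorem sortfold_getD (S : List (Int × Int × Int) → List (Int × Int × Int)) :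
    ∀ (ks : List Int), ks.Nodup →
      ∀ (d : PySem.Dict Int (List (Int × Int × Int))) (k : Int),
      ((ks.foldl (fun d k => d.insert k (S (d.getD k []))) d).getD k [])
        = if k ∈ ks then S (d.getD k []) else d.getD k [] := by
  intro ks
  induction ks with
  | nil => intro _ d k; simp
  | cons k0 t ih =>
    intro hnd d k
    have hnd' := (List.nodup_cons.mp hnd)
    simp only [List.foldl_cons]
    rw [ih hnd'.2]
    by_cases hkt : k ∈ t
    · have hne : k ≠ k0 := fun h => hnd'.1 (h ▸ hkt)
      rw [if_pos hkt, if_pos (List.mem_cons.mpr (Or.inr hkt)), PySem.Dict.getD_insert, if_neg hne]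
    · rw [if_neg hkt]
      by_cases hk0 : k = k0
      · rw [PySem.Dict.getD_insert, if_pos hk0, if_pos (List.mem_cons.mpr (Or.inl hk0)), hk0]
      · rw [PySem.Dict.getD_insert, if_neg hk0, if_neg (by simp [hk0, hkt])]

theorem sortGroups_getD (dd : PySem.Dict Int (List (Int × Int × Int))) (h : dd.keys.Nodup) (k : Int) :
    (pvSortGroups dd).getD k []
      = if dd.contains k = true then
          PySem.List.sorted2 (dd.getD k []) (fun v => v.1) (fun v => v.2.2) false
        else dd.getD k [] := by
  unfold pvSortGroups
  rw [sortfold_getD (fun g => PySem.List.sorted2 g (fun v => v.1) (fun v => v.2.2) false) dd.keys h]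
  by_cases hc : dd.contains k = true
  · rw [if_pos ((PySem.Dict.contains_iff_mem_keys dd k).mp hc), if_pos hc]
  · rw [if_neg (fun hm => hc ((PySem.Dict.contains_iff_mem_keys dd k).mpr hm)), if_neg hc]

theorem sortGroups_contains (dd : PySem.Dict Int (List (Int × Int × Int))) (k : Int) :
    (pvSortGroups dd).contains k = dd.contains k := by
  rw [Bool.eq_iff_iff, PySem.Dict.contains_iff_mem_keys, PySem.Dict.contains_iff_mem_keys]
  unfold pvSortGroups
  rw [PySem.Dict.keys_foldl_insert]
  rw [PySem.Set.mem_update]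
  tauto

-- ---- order facts about the sorted groups ----

theorem insertBy_pairwise_fst (bf : (Int × Int × Int) → (Int × Int × Int) → Bool)
    (h1 : ∀ a b, bf a b = true → a.1 ≤ b.1) (h2 : ∀ a b, bf a b = false → b.1 ≤ a.1) :
    ∀ (ys : List (Int × Int × Int)) (z : Int × Int × Int),
      ys.Pairwise (fun a b => a.1 ≤ b.1) →
      (PySem.List.insertBy bf z ys).Pairwise (fun a b => a.1 ≤ b.1) := by
  intro ys
  induction ys with
  | nil => intro z _; simp [PySem.List.insertBy]
  | cons y t ih =>
    intro z hp
    rcases List.pairwise_cons.mp hp with ⟨hy, ht⟩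
    rw [PySem.List.insertBy]
    by_cases hb : bf z y = true
    · rw [if_pos hb]
      refine List.pairwise_cons.mpr ⟨?_, hp⟩
      intro b hbmem
      rcases List.mem_cons.mp hbmem with rfl | hbt
      · exact h1 _ _ hb
      · exact le_trans (h1 _ _ hb) (hy b hbt)
    · rw [if_neg hb]
      refine List.pairwise_cons.mpr ⟨?_, ih z ht⟩
      intro b hbmem
      rcases (PySem.List.insertBy_mem_iff bf z b t).mp hbmem with rfl | hbt
      · exact h2 _ _ (Bool.eq_false_iff.mpr hb)
      · exact hy b hbt

theorem sorted2_pairwise_fst (xs : List (Int × Int × Int)) :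
    (PySem.List.sorted2 xs (fun v => v.1) (fun v => v.2.2) false).Pairwise
      (fun a b => a.1 ≤ b.1) := by
  show (List.foldl (fun acc v => PySem.List.insertBy
      (fun a b => decide (a.1 < b.1) || (!decide (b.1 < a.1) && decide (a.2.2 < b.2.2))) v acc)
      [] xs).Pairwise (fun a b => a.1 ≤ b.1)
  have key : ∀ (l : List (Int × Int × Int)) (acc : List (Int × Int × Int)),
      acc.Pairwise (fun a b => a.1 ≤ b.1) →
      (List.foldl (fun acc v => PySem.List.insertBy
        (fun a b => decide (a.1 < b.1) || (!decide (b.1 < a.1) && decide (a.2.2 < b.2.2))) v acc)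
        acc l).Pairwise (fun a b => a.1 ≤ b.1) := by
    intro l
    induction l with
    | nil => intro acc h; exact h
    | cons v t ih =>
      intro acc h
      refine ih _ (insertBy_pairwise_fst _ ?_ ?_ acc v h)
      · intro a b hb
        simp only [Bool.or_eq_true, Bool.and_eq_true, decide_eq_true_eq, Bool.not_eq_eq_eq_not,
          Bool.not_true, decide_eq_false_iff_not] at hb
        rcases hb with hb | ⟨hb, _⟩ <;> omega
      · intro a b hb
        simp only [Bool.or_eq_false_iff, Bool.and_eq_false_iff] at hb
        have := hb.1
        simp only [decide_eq_false_iff_not] at this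
        omega
  exact key xs [] (List.Pairwise.nil)


-- ---- the inner while/for loops of A, characterised ----

theorem takeWhile_eq_filter_of_mono (c : Int) (f : (Int × Int × Int) → Int) :
    ∀ (l : List (Int × Int × Int)), l.Pairwise (fun a b => f a ≤ f b) →
      l.takeWhile (fun v => decide (f v < c)) = l.filter (fun v => decide (f v < c)) := by
  intro l
  induction l with
  | nil => intro _; rfl
  | cons a t ih =>
    intro hp
    rcases List.pairwise_cons.mp hp with ⟨ha, ht⟩
    by_cases h : f a < c
    · have hd : decide (f a < c) = true := decide_eq_true h
      simp [hd, ih ht]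
    · have hd : decide (f a < c) = false := decide_eq_false h
      simp only [List.takeWhile_cons, List.filter_cons, hd, Bool.false_eq_true, if_false]
      symm
      rw [List.filter_eq_nil_iff]
      intro b hb
      simp only [decide_eq_true_eq]
      have := ha b hb
      omega

theorem advance_eq (l1 : Int) : ∀ (rem : List (Int × Int × Int)) (mo : Int),
    pvAdvance l1 rem mo =
      (rem.dropWhile (fun v => decide (v.2.1 < l1)),
       ((rem.takeWhile (fun v => decide (v.2.1 < l1))).map (fun v => v.2.2)).foldl min mo) := by
  intro rem
  induction rem with
  | nil => intro mo; rfl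
  | cons v t ih =>
    intro mo
    by_cases h : v.2.1 < l1
    · simp only [pvAdvance, if_pos h, List.dropWhile_cons, List.takeWhile_cons,
        decide_eq_true h, ih]
      rfl
    · simp only [pvAdvance, if_neg h, List.dropWhile_cons, List.takeWhile_cons,
        decide_eq_false h]
      rfl

def pvMinCostG (l1 : Int) (g2 : List (Int × Int × Int)) : Int :=
  ((g2.filter (fun v => decide (v.2.1 < l1))).map (fun v => v.2.2)).foldl min pvMaxsize

theorem inner_fold_spec (g2 : List (Int × Int × Int)) :
    ∀ (g1 taken rem : List (Int × Int × Int)) (mo ans : Int),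
      g2 = taken ++ rem →
      mo = (taken.map (fun v => v.2.2)).foldl min pvMaxsize →
      (∀ v1 ∈ g1, ∀ u ∈ taken, u.2.1 < v1.1) →
      rem.Pairwise (fun a b => a.2.1 ≤ b.2.1) →
      g1.Pairwise (fun a b => a.1 ≤ b.1) →
      (g1.foldl (fun s v1 =>
          let p := pvAdvance v1.1 s.1 s.2.1
          (p.1, p.2, min s.2.2 (v1.2.2 + p.2))) (rem, mo, ans)).2.2
        = g1.foldl (fun a v1 => min a (v1.2.2 + pvMinCostG v1.1 g2)) ans := by
  intro g1
  induction g1 with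
  | nil => intro _ _ _ _ hsplit _ _ _ _; rfl
  | cons v1 t ih =>
    intro taken rem mo ans hsplit hmo htaken hrem hg1
    rcases List.pairwise_cons.mp hg1 with ⟨hv1, ht⟩
    simp only [List.foldl_cons]
    have htk : rem.takeWhile (fun v => decide (v.2.1 < v1.1))
        = rem.filter (fun v => decide (v.2.1 < v1.1)) :=
      takeWhile_eq_filter_of_mono v1.1 (fun v => v.2.1) rem hrem
    have hmo' : ((rem.takeWhile (fun v => decide (v.2.1 < v1.1))).map (fun v => v.2.2)).foldl min mo
        = pvMinCostG v1.1 g2 := by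
      rw [htk, hmo, pvMinCostG, hsplit, List.filter_append, List.map_append, List.foldl_append]
      have : taken.filter (fun v => decide (v.2.1 < v1.1)) = taken :=
        List.filter_eq_self.mpr (fun u hu => decide_eq_true
          (htaken v1 List.mem_cons_self u hu))
      rw [this]
    rw [advance_eq v1.1 rem mo]
    simp only [hmo']
    refine ih (taken ++ rem.takeWhile (fun v => decide (v.2.1 < v1.1)))
      (rem.dropWhile (fun v => decide (v.2.1 < v1.1)))
      (pvMinCostG v1.1 g2) (min ans (v1.2.2 + pvMinCostG v1.1 g2)) ?_ ?_ ?_ ?_ ht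
    · rw [hsplit, List.append_assoc, List.takeWhile_append_dropWhile]
    · rw [← hmo', hmo, List.map_append, List.foldl_append]
    · intro w hw u hu
      rcases List.mem_append.mp hu with hu | hu
      · exact lt_of_lt_of_le (htaken v1 List.mem_cons_self u hu) (hv1 w hw)
      · have h1 : decide (u.2.1 < v1.1) = true := List.mem_takeWhile_imp (p := fun (v : Int × Int × Int) => decide (v.2.1 < v1.1)) hu
        have h2 := hv1 w hw
        simp only [decide_eq_true_eq] at h1
        omega
    · exact hrem.sublist (List.dropWhile_sublist _)

-- ---- A characterised as a fold of minima over a candidate list pvJ ----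

def pvDD (x : Int) (vs : List (Int × Int × Int)) : PySem.Dict Int (List (Int × Int × Int)) :=
  pvSortGroups (pvBuild x vs)

def pvJ (x : Int) (vs : List (Int × Int × Int)) : List Int :=
  (PySem.List.pyRange 1 x 1).flatMap (fun d =>
    if (pvDD x vs).contains d && (pvDD x vs).contains (x - d) then
      ((pvDD x vs).getD d []).map
        (fun v1 => v1.2.2 + pvMinCostG v1.1 ((pvDD x vs).getD (x - d) []))
    else [])

theorem DD_perm (x : Int) (vs : List (Int × Int × Int)) (k : Int) :
    ((pvDD x vs).getD k []).Perm ((pvBuild x vs).getD k []) := by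
  rw [pvDD, sortGroups_getD _ (build_nodup_keys x vs)]
  by_cases hc : (pvBuild x vs).contains k = true
  · rw [if_pos hc]; exact PySem.List.sorted2_perm _ _ _ _
  · rw [if_neg hc]

theorem mem_DD (x : Int) (vs : List (Int × Int × Int)) (k : Int) (v : Int × Int × Int) :
    v ∈ (pvDD x vs).getD k [] ↔ v ∈ vs ∧ pvDur v ≤ x ∧ pvDur v = k := by
  rw [(DD_perm x vs k).mem_iff, build_getD, List.mem_filter, pvGrpB]
  simp

theorem DD_contains (x : Int) (vs : List (Int × Int × Int)) (k : Int) :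
    (pvDD x vs).contains k = true ↔ ∃ v ∈ vs, pvDur v ≤ x ∧ pvDur v = k := by
  rw [pvDD, sortGroups_contains, build_contains, List.any_eq_true]
  simp [pvGrpB]

theorem DD_pairwise_fst (x : Int) (vs : List (Int × Int × Int)) (k : Int) :
    ((pvDD x vs).getD k []).Pairwise (fun a b => a.1 ≤ b.1) := by
  rw [pvDD, sortGroups_getD _ (build_nodup_keys x vs)]
  by_cases hc : (pvBuild x vs).contains k = true
  · rw [if_pos hc]; exact sorted2_pairwise_fst _
  · rw [if_neg hc, build_getD]
    have hnil : vs.filter (pvGrpB x k) = [] := by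
      rw [List.filter_eq_nil_iff]
      intro a ha hb
      exact hc ((build_contains x vs k) ▸ List.any_eq_true.mpr ⟨a, ha, hb⟩)
    rw [hnil]
    exact List.Pairwise.nil

theorem DD_pairwise_r (x : Int) (vs : List (Int × Int × Int)) (k : Int) :
    ((pvDD x vs).getD k []).Pairwise (fun a b => a.2.1 ≤ b.2.1) := by
  refine (DD_pairwise_fst x vs k).imp_of_mem ?_
  intro a b ha hb hab
  have hda : pvDur a = k := ((mem_DD x vs k a).mp ha).2.2
  have hdb : pvDur b = k := ((mem_DD x vs k b).mp hb).2.2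
  simp only [pvDur] at hda hdb
  omega

theorem A_eq_J (n x : Int) (vs : List (Int × Int × Int)) :
    find_minimal_voucher_cost n x vs =
      (if (pvJ x vs).foldl min pvMaxsize ≠ pvMaxsize then (pvJ x vs).foldl min pvMaxsize else -1) := by
  have hstep : ∀ (a d : Int),
      (if (pvDD x vs).contains d && (pvDD x vs).contains (x - d) then
          pvInner ((pvDD x vs).getD d []) ((pvDD x vs).getD (x - d) []) a
        else a)
      = (if (pvDD x vs).contains d && (pvDD x vs).contains (x - d) then
            ((pvDD x vs).getD d []).map
              (fun v1 => v1.2.2 + pvMinCostG v1.1 ((pvDD x vs).getD (x - d) []))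
          else []).foldl min a := by
    intro a d
    by_cases hc : ((pvDD x vs).contains d && (pvDD x vs).contains (x - d)) = true
    · rw [if_pos hc, if_pos hc]
      unfold pvInner
      rw [inner_fold_spec ((pvDD x vs).getD (x - d) []) ((pvDD x vs).getD d []) []
        ((pvDD x vs).getD (x - d) []) pvMaxsize a
        rfl rfl (by intro _ _ u hu; exact absurd hu (List.not_mem_nil))
        (DD_pairwise_r x vs (x - d)) (DD_pairwise_fst x vs d)]
      exact (List.foldl_map
        (f := fun (v1 : Int × Int × Int) => v1.2.2 + pvMinCostG v1.1 ((pvDD x vs).getD (x - d) []))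
        (g := fun (a j : Int) => min a j)).symm
    · rw [if_neg hc, if_neg hc]; rfl
  have hall : (PySem.List.pyRange 1 x 1).foldl (fun ans d =>
        if (pvDD x vs).contains d && (pvDD x vs).contains (x - d) then
          pvInner ((pvDD x vs).getD d []) ((pvDD x vs).getD (x - d) []) ans
        else ans) pvMaxsize
      = (pvJ x vs).foldl min pvMaxsize := by
    rw [PySem.List.foldl_congr_mem (PySem.List.pyRange 1 x 1)
      (fun ans d =>
        if (pvDD x vs).contains d && (pvDD x vs).contains (x - d) then
          pvInner ((pvDD x vs).getD d []) ((pvDD x vs).getD (x - d) []) ans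
        else ans)
      (fun a d =>
        (if (pvDD x vs).contains d && (pvDD x vs).contains (x - d) then
            ((pvDD x vs).getD d []).map
              (fun v1 => v1.2.2 + pvMinCostG v1.1 ((pvDD x vs).getD (x - d) []))
          else []).foldl min a)
      pvMaxsize (fun a d _ => hstep a d)]
    rw [pv_foldl_foldl min (fun d =>
        (if (pvDD x vs).contains d && (pvDD x vs).contains (x - d) then
            ((pvDD x vs).getD d []).map
              (fun v1 => v1.2.2 + pvMinCostG v1.1 ((pvDD x vs).getD (x - d) []))
          else []))]
    rfl
  show (if ((PySem.List.pyRange 1 x 1).foldl (fun ans d =>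
        if (pvDD x vs).contains d && (pvDD x vs).contains (x - d) then
          pvInner ((pvDD x vs).getD d []) ((pvDD x vs).getD (x - d) []) ans
        else ans) pvMaxsize) ≠ pvMaxsize
      then ((PySem.List.pyRange 1 x 1).foldl (fun ans d =>
        if (pvDD x vs).contains d && (pvDD x vs).contains (x - d) then
          pvInner ((pvDD x vs).getD d []) ((pvDD x vs).getD (x - d) []) ans
        else ans) pvMaxsize) else -1) = _
  rw [hall]


-- ---- membership facts about pvJ and pvMinCostG ----

theorem pvGoodB_iff (x : Int) (u v : Int × Int × Int) :
    pvGoodB x u v = true ↔ (u.2.1 < v.1 ∧ 1 ≤ pvDur u ∧ 1 ≤ pvDur v ∧ pvDur u + pvDur v = x) := by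
  simp [pvGoodB, pvDur]

theorem mem_J (x : Int) (vs : List (Int × Int × Int)) (j : Int) :
    j ∈ pvJ x vs ↔ ∃ d, 1 ≤ d ∧ d < x ∧ (pvDD x vs).contains d = true ∧
      (pvDD x vs).contains (x - d) = true ∧
      ∃ v1 ∈ (pvDD x vs).getD d [],
        j = v1.2.2 + pvMinCostG v1.1 ((pvDD x vs).getD (x - d) []) := by
  unfold pvJ
  rw [List.mem_flatMap]
  constructor
  · rintro ⟨d, hd, hmem⟩
    have hdr := PySem.List.mem_pyRange_one.mp hd
    by_cases hc : ((pvDD x vs).contains d && (pvDD x vs).contains (x - d)) = true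
    · rw [if_pos hc] at hmem
      rcases List.mem_map.mp hmem with ⟨v1, hv1, rfl⟩
      have hc' : (pvDD x vs).contains d = true ∧ (pvDD x vs).contains (x - d) = true := by
        simpa using hc
      exact ⟨d, hdr.1, hdr.2, hc'.1, hc'.2, v1, hv1, rfl⟩
    · rw [if_neg hc] at hmem; exact absurd hmem (List.not_mem_nil)
  · rintro ⟨d, h1, h2, hc1, hc2, v1, hv1, rfl⟩
    refine ⟨d, PySem.List.mem_pyRange_one.mpr ⟨h1, h2⟩, ?_⟩
    rw [if_pos (by rw [hc1, hc2]; rfl)]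
    exact List.mem_map.mpr ⟨v1, hv1, rfl⟩

theorem minCostG_le (l1 : Int) (g2 : List (Int × Int × Int)) (v : Int × Int × Int)
    (hv : v ∈ g2) (hr : v.2.1 < l1) : pvMinCostG l1 g2 ≤ v.2.2 :=
  (PySem.List.foldl_min_le _ _).2 _
    (List.mem_map.mpr ⟨v, List.mem_filter.mpr ⟨hv, decide_eq_true hr⟩, rfl⟩)

theorem minCostG_cases (l1 : Int) (g2 : List (Int × Int × Int)) :
    pvMinCostG l1 g2 = pvMaxsize ∨
      ∃ v ∈ g2, v.2.1 < l1 ∧ pvMinCostG l1 g2 = v.2.2 := by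
  rcases PySem.List.foldl_min_mem
      ((g2.filter (fun v => decide (v.2.1 < l1))).map (fun v => v.2.2)) pvMaxsize with h | h
  · exact Or.inl h
  · rcases List.mem_map.mp h with ⟨v, hv, hc⟩
    rcases List.mem_filter.mp hv with ⟨hvg, hvr⟩
    exact Or.inr ⟨v, hvg, by simpa using hvr, hc.symm⟩

-- every real candidate sum is dominated by some element of pvJ
theorem good_gives_J (x : Int) (vs : List (Int × Int × Int)) (u v : Int × Int × Int)
    (hu : u ∈ vs) (hv : v ∈ vs) (hg : pvGoodB x u v = true) :
    ∃ j ∈ pvJ x vs, j ≤ u.2.2 + v.2.2 := by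
  rcases (pvGoodB_iff x u v).mp hg with ⟨hlt, hdu, hdv, hsum⟩
  refine ⟨v.2.2 + pvMinCostG v.1 ((pvDD x vs).getD (x - pvDur v) []), ?_, ?_⟩
  · rw [mem_J]
    refine ⟨pvDur v, hdv, by omega, ?_, ?_, v, ?_, rfl⟩
    · exact (DD_contains x vs (pvDur v)).mpr ⟨v, hv, by omega, rfl⟩
    · exact (DD_contains x vs (x - pvDur v)).mpr ⟨u, hu, by omega, by omega⟩
    · exact (mem_DD x vs (pvDur v) v).mpr ⟨hv, by omega, rfl⟩
  · have : pvMinCostG v.1 ((pvDD x vs).getD (x - pvDur v) []) ≤ u.2.2 :=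
      minCostG_le _ _ u ((mem_DD x vs (x - pvDur v) u).mpr ⟨hu, by omega, by omega⟩) hlt
    omega

-- every element of pvJ is a real candidate sum or a sentinel-polluted value
theorem J_elem (x : Int) (vs : List (Int × Int × Int)) (j : Int) (hj : j ∈ pvJ x vs) :
    (∃ u ∈ vs, ∃ v ∈ vs, pvGoodB x u v = true ∧ j = u.2.2 + v.2.2) ∨
    (∃ v1 ∈ vs, 1 ≤ pvDur v1 ∧ pvDur v1 ≤ x - 1 ∧
      (∃ z ∈ vs, pvDur z = x - pvDur v1) ∧ j = v1.2.2 + pvMaxsize) := by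
  rcases (mem_J x vs j).mp hj with ⟨d, h1, h2, hc1, hc2, v1, hv1, rfl⟩
  rcases (mem_DD x vs d v1).mp hv1 with ⟨hv1vs, hdx, hdd⟩
  rcases minCostG_cases v1.1 ((pvDD x vs).getD (x - d) []) with hms | ⟨v2, hv2, hr, hcost⟩
  · right
    rcases (DD_contains x vs (x - d)).mp hc2 with ⟨z, hz, hzx, hzd⟩
    exact ⟨v1, hv1vs, by omega, by omega, ⟨z, hz, by omega⟩, by rw [hms]⟩
  · left
    rcases (mem_DD x vs (x - d) v2).mp hv2 with ⟨hv2vs, hv2x, hv2d⟩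
    refine ⟨v2, hv2vs, v1, hv1vs, (pvGoodB_iff x v2 v1).mpr ⟨hr, by omega, by omega, by omega⟩, ?_⟩
    rw [hcost]; omega

theorem dom_cost (n x : Int) (vs : List (Int × Int × Int))
    (h : Dom_find_minimal_voucher_cost n x vs) :
    ∀ v ∈ vs, -2147483648 ≤ v.2.2 ∧ v.2.2 ≤ 2147483648 := by
  unfold Dom_find_minimal_voucher_cost at h
  simp only [Bool.and_eq_true, List.all_eq_true, pvDomInt, decide_eq_true_eq] at h
  intro v hv
  exact (h.2 v hv).2.2

-- ---- the main equivalence outside D_ ----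

theorem main_eq (n x : Int) (vs : List (Int × Int × Int))
    (hDom : Dom_find_minimal_voucher_cost n x vs)
    (hND : ¬ D_find_minimal_voucher_cost n x vs) :
    find_minimal_voucher_cost n x vs = find_minimal_voucher_cost_alt n x vs := by
  have hms : pvMaxsize = 9223372036854775807 := rfl
  have hcost := dom_cost n x vs hDom
  rw [A_eq_J n x vs, alt_eq_cands n x vs]
  rcases hc : pvCands x vs with _ | ⟨s, t⟩
  · -- no valid pair at all: A's fold keeps the sentinel, both return -1
    have hempty := (cands_nil_iff x vs).mp hc
    have hJ : ∀ j ∈ pvJ x vs, pvMaxsize ≤ j := by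
      intro j hj
      rcases J_elem x vs j hj with ⟨u, hu, v, hv, hg, _⟩ | ⟨v1, hv1, hd1, hd2, ⟨z, hz, hzd⟩, hjv⟩
      · rw [hempty u hu v hv] at hg; exact absurd hg (by simp)
      · have hpos : 0 ≤ v1.2.2 := by
          by_contra hneg
          apply hND
          constructor
          · intro u hu v hv hP
            have := hempty u hu v hv
            rw [(pvGoodB_iff x u v).mpr hP] at this
            exact absurd this (by simp)
          · exact ⟨v1, hv1, by omega, hd1, by omega, z, hz, hzd⟩
        omega
    have hfold := PySem.List.foldl_min_le (pvJ x vs) pvMaxsize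
    have : (pvJ x vs).foldl min pvMaxsize = pvMaxsize := by
      rcases PySem.List.foldl_min_mem (pvJ x vs) pvMaxsize with h | h
      · exact h
      · exact le_antisymm hfold.1 (hJ _ h)
    rw [this]
    simp
  · -- a valid pair exists: both compute its minimal sum
    have hm_mem : t.foldl min s ∈ pvCands x vs := by
      rw [hc]
      rcases PySem.List.foldl_min_mem t s with h | h
      · rw [h]; exact List.mem_cons_self
      · exact List.mem_cons_of_mem _ h
    have hm_min : ∀ c ∈ pvCands x vs, t.foldl min s ≤ c := by
      intro c hcm
      rw [hc] at hcm
      rcases List.mem_cons.mp hcm with hcs | hct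
      · rw [hcs]; exact (PySem.List.foldl_min_le t s).1
      · exact (PySem.List.foldl_min_le t s).2 _ hct
    rcases (mem_cands x vs _).mp hm_mem with ⟨u, hu, v, hv, hg, hmuv⟩
    have h1 := hcost u hu
    have h2 := hcost v hv
    have hm_bound : t.foldl min s ≤ 4294967296 := by omega
    have hansle : (pvJ x vs).foldl min pvMaxsize ≤ t.foldl min s := by
      rcases good_gives_J x vs u v hu hv hg with ⟨j, hjJ, hjle⟩
      have := (PySem.List.foldl_min_le (pvJ x vs) pvMaxsize).2 _ hjJ
      omega
    have hansge : t.foldl min s ≤ (pvJ x vs).foldl min pvMaxsize := by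
      rcases PySem.List.foldl_min_mem (pvJ x vs) pvMaxsize with h | h
      · omega
      · rcases J_elem x vs _ h with ⟨u', hu', v', hv', hg', hj'⟩ | ⟨v1, hv1, _, _, _, hjv⟩
        · rw [hj']
          exact hm_min _ ((mem_cands x vs _).mpr ⟨u', hu', v', hv', hg', rfl⟩)
        · have := (hcost v1 hv1).1
          omega
    have hans : (pvJ x vs).foldl min pvMaxsize = t.foldl min s := le_antisymm hansle hansge
    rw [hans, if_pos (show t.foldl min s ≠ pvMaxsize by omega)]

-- ---- inside D_: A leaks the sentinel, B returns -1, and they always differ ----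

theorem main_ne (n x : Int) (vs : List (Int × Int × Int))
    (hDom : Dom_find_minimal_voucher_cost n x vs)
    (hD : D_find_minimal_voucher_cost n x vs) :
    find_minimal_voucher_cost n x vs ≠ find_minimal_voucher_cost_alt n x vs := by
  have hms : pvMaxsize = 9223372036854775807 := rfl
  have hcost := dom_cost n x vs hDom
  rcases hD with ⟨hnp, w, hw, hwneg, hwd1, hwd2, z, hz, hzd⟩
  have hnpB : ∀ u ∈ vs, ∀ v ∈ vs, pvGoodB x u v = false := by
    intro u hu v hv
    rw [Bool.eq_false_iff]
    intro hg
    exact hnp u hu v hv ((pvGoodB_iff x u v).mp hg)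
  have hcnil : pvCands x vs = [] := (cands_nil_iff x vs).mpr hnpB
  rw [A_eq_J n x vs, alt_eq_cands n x vs, hcnil]
  have hwdur1 : 1 ≤ pvDur w := hwd1
  have hwdur2 : pvDur w < x := hwd2
  have hzdur : pvDur z = x - pvDur w := hzd
  -- the sentinel-polluted candidate of w is in pvJ
  have hjw : w.2.2 + pvMinCostG w.1 ((pvDD x vs).getD (x - pvDur w) []) ∈ pvJ x vs := by
    rw [mem_J]
    refine ⟨pvDur w, hwdur1, by omega, ?_, ?_, w, ?_, rfl⟩
    · exact (DD_contains x vs (pvDur w)).mpr ⟨w, hw, by omega, rfl⟩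
    · exact (DD_contains x vs (x - pvDur w)).mpr ⟨z, hz, by omega, hzdur⟩
    · exact (mem_DD x vs (pvDur w) w).mpr ⟨hw, by omega, rfl⟩
  have hmo : pvMinCostG w.1 ((pvDD x vs).getD (x - pvDur w) []) = pvMaxsize := by
    rcases minCostG_cases w.1 ((pvDD x vs).getD (x - pvDur w) []) with h | ⟨v2, hv2, hr, _⟩
    · exact h
    · exfalso
      rcases (mem_DD x vs (x - pvDur w) v2).mp hv2 with ⟨hv2vs, _, hv2d⟩
      have := hnpB v2 hv2vs w hw
      rw [(pvGoodB_iff x v2 w).mpr ⟨hr, by omega, by omega, by omega⟩] at this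
      exact absurd this (by simp)
  rw [hmo] at hjw
  have hansle : (pvJ x vs).foldl min pvMaxsize ≤ w.2.2 + pvMaxsize :=
    (PySem.List.foldl_min_le (pvJ x vs) pvMaxsize).2 _ hjw
  have hwb := hcost w hw
  have hanspos : 0 < (pvJ x vs).foldl min pvMaxsize := by
    rcases PySem.List.foldl_min_mem (pvJ x vs) pvMaxsize with h | h
    · omega
    · rcases J_elem x vs _ h with ⟨u, hu, v, hv, hg, _⟩ | ⟨v1, hv1, _, _, _, hjv⟩
      · rw [hnpB u hu v hv] at hg; exact absurd hg (by simp)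
      · have := (hcost v1 hv1).1
        omega
  rw [if_pos (show (pvJ x vs).foldl min pvMaxsize ≠ pvMaxsize by omega)]
  show (pvJ x vs).foldl min pvMaxsize ≠ -1
  omega

-- ===== VERDICT (by name: the statement is the Claim_ definition above) =====
theorem find_minimal_voucher_cost_spec : Claim_unchanged_find_minimal_voucher_cost := by
  intro n x vouchers hDom
  unfold Spec_find_minimal_voucher_cost
  intro hND
  exact main_eq n x vouchers hDom hND
theorem find_minimal_voucher_cost_changed : Claim_changed_find_minimal_voucher_cost := by
  unfold Claim_changed_find_minimal_voucher_cost; decide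
theorem find_minimal_voucher_cost_tight : Claim_exact_find_minimal_voucher_cost := by
  intro n x vouchers hDom hD
  exact main_ne n x vouchers hDom hD
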